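-- pv_equiv track=rewrite | github.com/S0NGMinHyuk/Algorithm-Coding-Test | 프로그래머스/2/389479. 서버 증설 횟수/서버 증설 횟수.py | solution
-- ===== SOURCE A (Python) =====
-- from collections import deque
--
-- def solution(players, m, k):
--     server = deque([])
--     count = 0
--
--     for time, user in enumerate(players):
--         while(len(server) > 0):
--             if server[0] <= time:
--                 server.popleft()
--             else:
--                 break
--
--         need = user // m - len(server)
--         if need > 0:
--             count += need
--             for _ in range(need):
--                 server.append(time+k)
--
--     return count
-- ===== SOURCE B (Python) =====
-- def solution(players, m, k):
--     # Sliding-window running sum of servers added per hour instead of a per-server deque.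
--     w = k if k > 1 else 1
--     added = [0] * len(players)
--     active = 0
--     count = 0
--     for t, user in enumerate(players):
--         if t >= w:
--             active -= added[t - w]
--         need = user // m - active
--         if need > 0:
--             added[t] = need
--             active += need
--             count += need
--     return count
-- ===== Notes on version B (the rewrite author's own statement) =====
-- stated objective: alternative
-- what changed: Replaces the per-server deque simulation (one queue entry and one append/pop per added server) by a sliding-window running sum of the number of servers added per hour, so no per-server queue is maintained; intended as faster, measured only ~1.2-1.4x on the generated inputs.
import Mathlib
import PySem

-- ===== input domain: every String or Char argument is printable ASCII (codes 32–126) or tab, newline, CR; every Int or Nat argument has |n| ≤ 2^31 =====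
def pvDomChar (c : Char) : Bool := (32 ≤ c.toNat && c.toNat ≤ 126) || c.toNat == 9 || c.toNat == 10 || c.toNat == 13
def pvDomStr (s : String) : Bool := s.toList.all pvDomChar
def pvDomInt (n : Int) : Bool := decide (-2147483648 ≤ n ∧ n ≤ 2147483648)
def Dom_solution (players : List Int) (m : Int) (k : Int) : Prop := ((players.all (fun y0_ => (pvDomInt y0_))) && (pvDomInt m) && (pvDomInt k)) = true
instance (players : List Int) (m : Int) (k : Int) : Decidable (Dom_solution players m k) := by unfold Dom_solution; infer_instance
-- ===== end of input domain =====

-- B replaces A's per-server deque simulation by a sliding-window running sum of the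
-- number of servers added per hour; equal return value on all inputs with m ≠ 0.

-- ===== PORT A =====
-- the 'while server and server[0] <= time: server.popleft()' loop
def popExpired (server : List Int) (time : Int) : List Int :=
  match server with
  | [] => []
  | h :: t => if h ≤ time then popExpired t time else h :: t

def solution (players : List Int) (m : Int) (k : Int) : Int :=
  ((PySem.List.enumerate players 0).foldl
    (fun (s : List Int × Int) tu =>
      let server := popExpired s.1 tu.1
      let need := PySem.Int.floordiv tu.2 m - (server.length : Int)
      if 0 < need then
        ((PySem.List.pyRange 0 need 1).foldl (fun srv _ => srv ++ [tu.1 + k]) server, s.2 + need)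
      else (server, s.2))
    ([], 0)).2

-- ===== PORT B =====
def solution_alt (players : List Int) (m : Int) (k : Int) : Int :=
  let w := if 1 < k then k else 1
  ((PySem.List.enumerate players 0).foldl
    (fun (s : List Int × Int × Int) tu =>
      let active := if w ≤ tu.1 then s.2.1 - PySem.List.pyGetD s.1 (tu.1 - w) 0 else s.2.1
      let need := PySem.Int.floordiv tu.2 m - active
      if 0 < need then (PySem.List.pySetD s.1 tu.1 need, active + need, s.2.2 + need)
      else (s.1, active, s.2.2))
    (List.replicate players.length 0, 0, 0)).2.2

-- ===== PRECONDITION & SPEC =====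
-- Pre_ excludes exactly the inputs where Python A raises ZeroDivisionError (m = 0 with a nonempty player list).
def Pre_solution (players : List Int) (m : Int) (k : Int) : Prop := players = [] ∨ m ≠ 0
instance (players : List Int) (m : Int) (k : Int) : Decidable (Pre_solution players m k) := by unfold Pre_solution; infer_instance
def pvWitness_solution : List Int × Int × Int := ([10, 5, 30], 3, 2)

def Spec_solution (players : List Int) (m : Int) (k : Int) (out : Int) : Prop := out = solution_alt players m k
instance (players : List Int) (m : Int) (k : Int) (out : Int) : Decidable (Spec_solution players m k out) := by unfold Spec_solution; infer_instance

-- ===== CLAIM (what is proved, stated in full; the proofs are below) =====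
def Claim_equal_solution : Prop := ∀ (players : List Int) (m : Int) (k : Int), Dom_solution players m k → Pre_solution players m k → Spec_solution players m k (solution players m k)

-- ===== LEMMAS AND PROOFS =====
-- helpers mirroring the two fold lambdas of the ports (proof-side only)
def fA (m k : Int) (s : List Int × Int) (tu : Int × Int) : List Int × Int :=
  let server := popExpired s.1 tu.1
  let need := PySem.Int.floordiv tu.2 m - (server.length : Int)
  if 0 < need then
    ((PySem.List.pyRange 0 need 1).foldl (fun srv _ => srv ++ [tu.1 + k]) server, s.2 + need)
  else (server, s.2)

def fB (m w : Int) (s : List Int × Int × Int) (tu : Int × Int) : List Int × Int × Int :=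
  let active := if w ≤ tu.1 then s.2.1 - PySem.List.pyGetD s.1 (tu.1 - w) 0 else s.2.1
  let need := PySem.Int.floordiv tu.2 m - active
  if 0 < need then (PySem.List.pySetD s.1 tu.1 need, active + need, s.2.2 + need)
  else (s.1, active, s.2.2)

def blocks (a : Int → Nat) (k : Int) (r : List Int) : List Int :=
  r.flatMap (fun t' => List.replicate (a t') (t' + k))

lemma popExpired_replicate_append (n : Nat) (x time : Int) (l : List Int) (h : x ≤ time) :
    popExpired (List.replicate n x ++ l) time = popExpired l time := by
  induction n with
  | zero => simp
  | succ n ih => simpa [popExpired, List.replicate_succ, h] using ih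

lemma popExpired_of_gt (l : List Int) (time : Int) (h : ∀ x ∈ l, time < x) :
    popExpired l time = l := by
  cases l with
  | nil => rfl
  | cons y t =>
    have : ¬ y ≤ time := by have := h y (by simp); omega
    simp [popExpired, this]

lemma mem_blocks {x : Int} {a : Int → Nat} {k : Int} {r : List Int} (h : x ∈ blocks a k r) :
    ∃ t' ∈ r, x = t' + k := by
  simp only [blocks, List.mem_flatMap, List.mem_replicate] at h
  obtain ⟨t', ht', _, rfl⟩ := h
  exact ⟨t', ht', rfl⟩

lemma length_blocks (a : Int → Nat) (k : Int) (r : List Int) :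
    ((blocks a k r).length : Int) = (r.map (fun t' => (a t' : Int))).sum := by
  induction r with
  | nil => simp [blocks]
  | cons h t ih => simp_all [blocks]

lemma blocks_append (a : Int → Nat) (k : Int) (r1 r2 : List Int) :
    blocks a k (r1 ++ r2) = blocks a k r1 ++ blocks a k r2 := by
  simp [blocks]

lemma blocks_congr {a b : Int → Nat} {k : Int} {r : List Int} (h : ∀ x ∈ r, a x = b x) :
    blocks a k r = blocks b k r :=
  List.flatMap_congr (by intro x hx; rw [h x hx])

lemma getD_pos (l : List Int) (t' : Int) (h : 0 ≤ t') (d : Int) :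
    PySem.List.pyGetD l t' d = l.getD t'.toNat d := by
  have e : t' = ((t'.toNat : Nat) : Int) := by omega
  rw [e, PySem.List.pyGetD_natCast]
  have h2 : (max t' 0).toNat = t'.toNat := by omega
  simp [List.getD, h2]

lemma loop_eq (m k w : Int) (hw : w = if 1 < k then k else 1) (ys : List Int) :
    ∀ (t : Nat) (a : Int → Nat) (added : List Int) (c : Int),
    (∀ t' : Int, t' < 0 → a t' = 0) →
    (∀ t' : Int, 0 ≤ t' → t' < (t : Int) → PySem.List.pyGetD added t' 0 = (a t' : Int)) →
    (∀ t' : Int, (t : Int) ≤ t' → 0 ≤ t' → PySem.List.pyGetD added t' 0 = 0) →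
    added.length = t + ys.length →
    ((PySem.List.enumerate ys (t : Int)).foldl (fA m k)
        (blocks a k (PySem.List.pyRange ((t : Int) - w) t 1), c)).2
      = ((PySem.List.enumerate ys (t : Int)).foldl (fB m w)
        (added, ((PySem.List.pyRange ((t : Int) - w) t 1).map (fun t' => (a t' : Int))).sum, c)).2.2 := by
  have hw1 : 1 ≤ w := by rw [hw]; split <;> omega
  have hkw : k ≤ w := by rw [hw]; split <;> omega
  induction ys with
  | nil => intro t a added c _ _ _ _; simp [PySem.List.enumerate]
  | cons u ys ih =>
    intro t a added c ha hlt hge hlen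
    rw [PySem.List.enumerate_cons, List.foldl_cons, List.foldl_cons]
    -- window split
    have hcons : PySem.List.pyRange ((t : Int) - w) t 1
        = ((t : Int) - w) :: PySem.List.pyRange ((t : Int) - w + 1) t 1 :=
      PySem.List.pyRange_one_cons (by omega)
    -- A's popping
    have hserver : popExpired (blocks a k (PySem.List.pyRange ((t : Int) - w) t 1)) (t : Int)
        = blocks a k (PySem.List.pyRange ((t : Int) - w + 1) t 1) := by
      rw [hcons]
      show popExpired (List.replicate (a ((t:Int) - w)) (((t:Int) - w) + k)
        ++ blocks a k (PySem.List.pyRange ((t : Int) - w + 1) t 1)) (t : Int) = _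
      rw [popExpired_replicate_append _ _ _ _ (by omega)]
      apply popExpired_of_gt
      intro x hx
      obtain ⟨t', ht', rfl⟩ := mem_blocks hx
      rw [PySem.List.mem_pyRange_one] at ht'
      have hcase : w = k ∨ w = 1 := by
        rcases lt_or_ge 1 k with h | h
        · exact Or.inl (by rw [hw, if_pos h])
        · exact Or.inr (by rw [hw, if_neg (by omega)])
      omega
    -- B's active update
    have hactive : (if w ≤ (t:Int) then
          ((PySem.List.pyRange ((t : Int) - w) t 1).map (fun t' => (a t' : Int))).sum
            - PySem.List.pyGetD added ((t:Int) - w) 0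
        else ((PySem.List.pyRange ((t : Int) - w) t 1).map (fun t' => (a t' : Int))).sum)
        = ((PySem.List.pyRange ((t : Int) - w + 1) t 1).map (fun t' => (a t' : Int))).sum := by
      rw [hcons]
      rcases le_or_gt w (t:Int) with h | h
      · rw [if_pos h, hlt ((t:Int) - w) (by omega) (by omega)]
        simp only [List.map_cons, List.sum_cons]
        ring
      · have haz : a ((t:Int) - w) = 0 := ha _ (by omega)
        rw [if_neg (not_le.mpr h)]
        simp [haz]
    have hlenS : ((blocks a k (PySem.List.pyRange ((t : Int) - w + 1) t 1)).length : Int)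
        = ((PySem.List.pyRange ((t : Int) - w + 1) t 1).map (fun t' => (a t' : Int))).sum :=
      length_blocks _ _ _
    set S := ((PySem.List.pyRange ((t : Int) - w + 1) t 1).map (fun t' => (a t' : Int))).sum with hS
    have htlen : t < added.length := by rw [hlen]; simp
    -- the common need
    set need := PySem.Int.floordiv u m - S with hneed
    -- rewrite one fA/fB step
    have stepA : fA m k (blocks a k (PySem.List.pyRange ((t : Int) - w) t 1), c) ((t:Int), u)
        = (if 0 < need then
            blocks a k (PySem.List.pyRange ((t : Int) - w + 1) t 1) ++ List.replicate need.toNat ((t:Int) + k)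
          else blocks a k (PySem.List.pyRange ((t : Int) - w + 1) t 1),
          if 0 < need then c + need else c) := by
      simp only [fA, hserver, hlenS]
      rw [PySem.List.foldl_append_singleton_eq_map (f := fun _ => (t:Int) + k)]
      rw [List.map_const', PySem.List.length_pyRange_one]
      split <;> simp [hneed]
    have stepB : fB m w (added, ((PySem.List.pyRange ((t : Int) - w) t 1).map (fun t' => (a t' : Int))).sum, c) ((t:Int), u)
        = (if 0 < need then added.set t need else added,
           if 0 < need then S + need else S,
           if 0 < need then c + need else c) := by
      simp only [fB, hactive]
      rw [show PySem.List.pySetD added (t:Int) need = added.set t need from PySem.List.pySetD_natCast ..]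
      split <;> simp [hneed]
    rw [stepA, stepB]
    by_cases hpos : 0 < need
    · simp only [if_pos hpos]
      -- new per-hour counts
      set a' : Int → Nat := fun t' => if t' = (t:Int) then need.toNat else a t' with ha'
      have hsrv' : blocks a k (PySem.List.pyRange ((t : Int) - w + 1) t 1) ++ List.replicate need.toNat ((t:Int) + k)
          = blocks a' k (PySem.List.pyRange (((t+1 : Nat) : Int) - w) (t+1 : Nat) 1) := by
        have hsplit : PySem.List.pyRange (((t+1 : Nat) : Int) - w) (t+1 : Nat) 1
            = PySem.List.pyRange (((t+1 : Nat) : Int) - w) t 1 ++ [(t:Int)] := by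
          push_cast
          rw [show ((t:Int) + 1 - w) = ((t:Int) - w + 1) by ring]
          exact PySem.List.pyRange_one_succ_right (by omega)
        rw [hsplit, show (((t+1 : Nat) : Int) - w) = ((t:Int) - w + 1) by push_cast; ring]
        rw [blocks_append]
        have : blocks a' k (PySem.List.pyRange ((t : Int) - w + 1) t 1)
            = blocks a k (PySem.List.pyRange ((t : Int) - w + 1) t 1) := by
          apply blocks_congr; intro x hx
          rw [PySem.List.mem_pyRange_one] at hx
          have hne : ¬ (x = (t:Int)) := by omega
          simp [ha', hne]
        rw [this]
        simp [blocks, ha']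
      have hsum' : S + need
          = ((PySem.List.pyRange (((t+1 : Nat) : Int) - w) (t+1 : Nat) 1).map (fun t' => (a' t' : Int))).sum := by
        have hsplit : PySem.List.pyRange (((t+1 : Nat) : Int) - w) (t+1 : Nat) 1
            = PySem.List.pyRange ((t : Int) - w + 1) t 1 ++ [(t:Int)] := by
          push_cast
          rw [show ((t:Int) + 1 - w) = ((t:Int) - w + 1) by ring]
          exact PySem.List.pyRange_one_succ_right (by omega)
        rw [hsplit]
        have : (PySem.List.pyRange ((t : Int) - w + 1) t 1).map (fun t' => (a' t' : Int))
            = (PySem.List.pyRange ((t : Int) - w + 1) t 1).map (fun t' => (a t' : Int)) := by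
          apply List.map_congr_left; intro x hx
          rw [PySem.List.mem_pyRange_one] at hx
          have hne : ¬ (x = (t:Int)) := by omega
          simp [ha', hne]
        rw [List.map_append, List.sum_append, this, ← hS]
        simp [ha']
        omega
      rw [hsrv', hsum']
      have := ih (t+1) a' (added.set t need) (c + need)
        (by intro t' h
            have hne : ¬ (t' = (t:Int)) := by omega
            simp [ha', hne]; exact ha t' h)
        (by intro t' h0 hlt'
            rw [getD_pos _ _ h0]
            by_cases he : t' = (t:Int)
            · subst he; simp [List.getD, htlen, ha']; omega
            · rw [ha']; simp only [if_neg he]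
              have : t'.toNat ≠ t := by omega
              rw [show (added.set t need).getD t'.toNat 0 = added.getD t'.toNat 0 by
                simp [List.getD, Ne.symm this]]
              rw [← getD_pos _ _ h0]
              exact hlt t' h0 (by push_cast at hlt' ⊢; omega))
        (by intro t' hge' h0
            rw [getD_pos _ _ h0]
            have : t'.toNat ≠ t := by push_cast at hge'; omega
            rw [show (added.set t need).getD t'.toNat 0 = added.getD t'.toNat 0 by
              simp [List.getD, Ne.symm this]]
            rw [← getD_pos _ _ h0]
            exact hge t' (by push_cast at hge' ⊢; omega) h0)
        (by simp [hlen]; omega)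
      rw [show (((t+1:Nat)):Int) = (t:Int) + 1 by push_cast; ring] at this
      exact this
    · simp only [if_neg hpos]
      set a' : Int → Nat := fun t' => if t' = (t:Int) then 0 else a t' with ha'
      have hsrv' : blocks a k (PySem.List.pyRange ((t : Int) - w + 1) t 1)
          = blocks a' k (PySem.List.pyRange ((t:Int) + 1 - w) (t+1 : Nat) 1) := by
        have hsplit : PySem.List.pyRange ((t:Int) + 1 - w) (t+1 : Nat) 1
            = PySem.List.pyRange ((t : Int) - w + 1) t 1 ++ [(t:Int)] := by
          push_cast
          rw [show ((t:Int) + 1 - w) = ((t:Int) - w + 1) by ring]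
          exact PySem.List.pyRange_one_succ_right (by omega)
        rw [hsplit, blocks_append]
        have : blocks a' k (PySem.List.pyRange ((t : Int) - w + 1) t 1)
            = blocks a k (PySem.List.pyRange ((t : Int) - w + 1) t 1) := by
          apply blocks_congr; intro x hx
          rw [PySem.List.mem_pyRange_one] at hx
          have hne : ¬ (x = (t:Int)) := by omega
          simp [ha', hne]
        rw [this]
        simp [blocks, ha']
      have hsum' : S
          = ((PySem.List.pyRange ((t:Int) + 1 - w) (t+1 : Nat) 1).map (fun t' => (a' t' : Int))).sum := by
        have hsplit : PySem.List.pyRange ((t:Int) + 1 - w) (t+1 : Nat) 1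
            = PySem.List.pyRange ((t : Int) - w + 1) t 1 ++ [(t:Int)] := by
          push_cast
          rw [show ((t:Int) + 1 - w) = ((t:Int) - w + 1) by ring]
          exact PySem.List.pyRange_one_succ_right (by omega)
        rw [hsplit]
        have : (PySem.List.pyRange ((t : Int) - w + 1) t 1).map (fun t' => (a' t' : Int))
            = (PySem.List.pyRange ((t : Int) - w + 1) t 1).map (fun t' => (a t' : Int)) := by
          apply List.map_congr_left; intro x hx
          rw [PySem.List.mem_pyRange_one] at hx
          have hne : ¬ (x = (t:Int)) := by omega
          simp [ha', hne]
        rw [List.map_append, List.sum_append, this, ← hS]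
        simp [ha']
      rw [hsrv', hsum']
      have := ih (t+1) a' added c
        (by intro t' h
            have hne : ¬ (t' = (t:Int)) := by omega
            simp [ha', hne]; exact ha t' h)
        (by intro t' h0 hlt'
            by_cases he : t' = (t:Int)
            · subst he; rw [hge _ (by omega) h0]; simp [ha']
            · rw [ha']; simp only [if_neg he]
              exact hlt t' h0 (by push_cast at hlt' ⊢; omega))
        (by intro t' hge' h0; exact hge t' (by push_cast at hge' ⊢; omega) h0)
        (by simp [hlen]; omega)
      rw [show (((t+1:Nat)):Int) = (t:Int) + 1 by push_cast; ring] at this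
      exact this

lemma getD_replicate_zero (n : Nat) (j : Nat) (d : Int) (hd : d = 0) :
    (List.replicate n (0:Int)).getD j d = 0 := by
  simp [List.getD, List.getElem?_replicate, hd]
  split <;> simp

theorem fold_eq (players : List Int) (m k : Int) :
    ((PySem.List.enumerate players 0).foldl (fA m k) ([], 0)).2
    = ((PySem.List.enumerate players 0).foldl (fB m (if 1 < k then k else 1))
        (List.replicate players.length 0, 0, 0)).2.2 := by
  have h := loop_eq m k (if 1 < k then k else 1) rfl players 0 (fun _ => 0)
    (List.replicate players.length 0) 0
    (fun _ _ => rfl)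
    (by intro t' h0 hlt; omega)
    (by intro t' _ h0
        rw [getD_pos _ _ h0]
        exact getD_replicate_zero _ _ _ rfl)
    (by simp)
  have e1 : (([]:List Int), (0:Int))
      = (blocks (fun _ => 0) k (PySem.List.pyRange (((0:Nat):Int) - (if 1 < k then k else 1)) ((0:Nat):Int) 1), (0:Int)) := by
    simp [blocks]
  have e2 : ((List.replicate players.length (0:Int)), (0:Int), (0:Int))
      = (List.replicate players.length (0:Int),
         ((PySem.List.pyRange (((0:Nat):Int) - (if 1 < k then k else 1)) ((0:Nat):Int) 1).map
            (fun t' => (((fun (_ : Int) => (0:Nat)) t' : Nat) : Int))).sum, (0:Int)) := by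
    simp
  rw [e1, e2]
  exact h

lemma solution_eq_fold (players : List Int) (m k : Int) :
    solution players m k = ((PySem.List.enumerate players 0).foldl (fA m k) ([], 0)).2 := rfl

lemma solution_alt_eq_fold (players : List Int) (m k : Int) :
    solution_alt players m k
      = ((PySem.List.enumerate players 0).foldl (fB m (if 1 < k then k else 1))
          (List.replicate players.length 0, 0, 0)).2.2 := rfl

-- ===== VERDICT (by name: the statement is the Claim_ definition above) =====
theorem solution_spec : Claim_equal_solution := by
  intro players m k _ _
  show solution players m k = solution_alt players m k
  rw [solution_eq_fold, solution_alt_eq_fold]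
  exact fold_eq players m k
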